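-- pv_equiv track=rewrite | github.com/samiaibrahim-spec/Streamlit-all-scripts | app.py | monthly_parse_campaign_name
-- ===== SOURCE A (Python) =====
-- def monthly_parse_campaign_name(campaign_name):
--     parts = campaign_name.split('_')
--     result = {'Customer_type': None, 'engine': None, 'brand': None}
--     for part in parts:
--         part_clean = part.strip().lower()
--         if 'google' in part_clean:
--             result['engine'] = 'Google'
--             break
--         elif 'bing' in part_clean:
--             result['engine'] = 'Bing'
--             break
--     for part in parts:
--         part_upper = part.upper()
--         if part_upper in ['CC', 'NC']:
--             result['Customer_type'] = part_upper
--             break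
--     for i, part in enumerate(parts):
--         part_lower = part.lower()
--         if part_lower == 'nonbr' or part_lower == 'nonbrand':
--             result['brand'] = 'NonBrand'
--             break
--         elif part_lower == 'br' or part_lower == 'brand':
--             result['brand'] = 'Brand'
--             break
--     return result
-- ===== SOURCE B (Python) =====
-- def monthly_parse_campaign_name(campaign_name):
--     # One pass over the parts; each field keeps its first match.
--     customer = engine = brand = None
--     for part in campaign_name.split('_'):
--         if engine is None:
--             pc = part.strip().lower()
--             if 'google' in pc:
--                 engine = 'Google'
--             elif 'bing' in pc:
--                 engine = 'Bing'
--         if customer is None: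
--             pu = part.upper()
--             if pu in ('CC', 'NC'):
--                 customer = pu
--         if brand is None:
--             pl = part.lower()
--             if pl in ('nonbr', 'nonbrand'):
--                 brand = 'NonBrand'
--             elif pl in ('br', 'brand'):
--                 brand = 'Brand'
--         if engine is not None and customer is not None and brand is not None:
--             break
--     return {'Customer_type': customer, 'engine': engine, 'brand': brand}
-- ===== Notes on version B (the rewrite author's own statement) =====
-- stated objective: alternative
-- what changed: A makes three separate first-match scans over the split parts (one per field); B makes a single pass maintaining all three fields as state, filling each only while it is still None and breaking once all three are set.
import Mathlib
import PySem

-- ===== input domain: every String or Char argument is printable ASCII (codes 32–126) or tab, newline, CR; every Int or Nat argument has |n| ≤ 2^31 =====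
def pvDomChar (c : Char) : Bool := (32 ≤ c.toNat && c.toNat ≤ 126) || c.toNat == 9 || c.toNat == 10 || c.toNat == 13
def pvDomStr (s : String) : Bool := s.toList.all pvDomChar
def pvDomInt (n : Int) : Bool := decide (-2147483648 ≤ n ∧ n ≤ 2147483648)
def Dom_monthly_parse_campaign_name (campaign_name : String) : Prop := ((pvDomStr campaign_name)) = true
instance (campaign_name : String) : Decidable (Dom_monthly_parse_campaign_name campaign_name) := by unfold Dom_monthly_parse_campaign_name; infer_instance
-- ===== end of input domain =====

-- B replaces A's three separate first-match scans over the parts with one single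
-- pass keeping the three fields as state (with an early break once all are set);
-- objective: alternative (one traversal instead of three, same result).


-- ===== PORT A =====
-- first for-loop of A: sets 'engine' and breaks at the first google/bing part
def pvLoopEngine : List String → PySem.Dict String (Option String) → PySem.Dict String (Option String)
  | [], result => result
  | part :: parts, result =>
    let part_clean := PySem.Str.lower (PySem.Str.strip part)
    if PySem.Str.isIn "google" part_clean then result.insert "engine" (some "Google")
    else if PySem.Str.isIn "bing" part_clean then result.insert "engine" (some "Bing")
    else pvLoopEngine parts result

-- second for-loop of A: sets 'Customer_type' and breaks at the first CC/NC part
def pvLoopCustomer : List String → PySem.Dict String (Option String) → PySem.Dict String (Option String)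
  | [], result => result
  | part :: parts, result =>
    let part_upper := PySem.Str.upper part
    if part_upper = "CC" ∨ part_upper = "NC" then result.insert "Customer_type" (some part_upper)
    else pvLoopCustomer parts result

-- third for-loop of A (the enumerate index i is never used): sets 'brand' and breaks
def pvLoopBrand : List String → PySem.Dict String (Option String) → PySem.Dict String (Option String)
  | [], result => result
  | part :: parts, result =>
    let part_lower := PySem.Str.lower part
    if part_lower = "nonbr" ∨ part_lower = "nonbrand" then result.insert "brand" (some "NonBrand")
    else if part_lower = "br" ∨ part_lower = "brand" then result.insert "brand" (some "Brand")
    else pvLoopBrand parts result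

def monthly_parse_campaign_name (campaign_name : String) : List (String × Option String) :=
  -- '_' ≠ "", so split? is always 'some'; getD [] is exact here
  let parts := (PySem.Str.split? campaign_name "_").getD []
  let result : PySem.Dict String (Option String) :=
    ⟨[("Customer_type", none), ("engine", none), ("brand", none)]⟩
  let result := pvLoopEngine parts result
  let result := pvLoopCustomer parts result
  let result := pvLoopBrand parts result
  result.items

-- ===== PORT B =====
-- single pass: state (customer, engine, brand); each field keeps its first match;
-- break once all three are set
def pvScan : List String → Option String → Option String → Option String →
    Option String × Option String × Option String
  | [], customer, engine, brand => (customer, engine, brand)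
  | part :: parts, customer, engine, brand =>
    let engine :=
      if engine.isNone then
        let pc := PySem.Str.lower (PySem.Str.strip part)
        if PySem.Str.isIn "google" pc then some "Google"
        else if PySem.Str.isIn "bing" pc then some "Bing"
        else none
      else engine
    let customer :=
      if customer.isNone then
        let pu := PySem.Str.upper part
        if pu = "CC" ∨ pu = "NC" then some pu else none
      else customer
    let brand :=
      if brand.isNone then
        let pl := PySem.Str.lower part
        if pl = "nonbr" ∨ pl = "nonbrand" then some "NonBrand"
        else if pl = "br" ∨ pl = "brand" then some "Brand"
        else none
      else brand
    if engine.isSome && customer.isSome && brand.isSome then (customer, engine, brand)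
    else pvScan parts customer engine brand

def monthly_parse_campaign_name_alt (campaign_name : String) : List (String × Option String) :=
  -- '_' ≠ "", so split? is always 'some'; getD [] is exact here
  let parts := (PySem.Str.split? campaign_name "_").getD []
  let st := pvScan parts none none none
  [("Customer_type", st.1), ("engine", st.2.1), ("brand", st.2.2)]

-- ===== PRECONDITION & SPEC =====
def Spec_monthly_parse_campaign_name (campaign_name : String) (out : List (String × Option String)) : Prop := out = monthly_parse_campaign_name_alt campaign_name
instance (campaign_name : String) (out : List (String × Option String)) : Decidable (Spec_monthly_parse_campaign_name campaign_name out) := by unfold Spec_monthly_parse_campaign_name; infer_instance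

-- ===== CLAIM (what is proved, stated in full; the proofs are below) =====
def Claim_equal_monthly_parse_campaign_name : Prop := ∀ (campaign_name : String), Dom_monthly_parse_campaign_name campaign_name → Spec_monthly_parse_campaign_name campaign_name (monthly_parse_campaign_name campaign_name)

-- ===== LEMMAS AND PROOFS =====

-- pure "first match" value of each of A's loops
def pvFindEngine : List String → Option String
  | [] => none
  | part :: parts =>
    let part_clean := PySem.Str.lower (PySem.Str.strip part)
    if PySem.Str.isIn "google" part_clean then some "Google"
    else if PySem.Str.isIn "bing" part_clean then some "Bing"
    else pvFindEngine parts

def pvFindCustomer : List String → Option String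
  | [] => none
  | part :: parts =>
    let part_upper := PySem.Str.upper part
    if part_upper = "CC" ∨ part_upper = "NC" then some part_upper
    else pvFindCustomer parts

def pvFindBrand : List String → Option String
  | [] => none
  | part :: parts =>
    let part_lower := PySem.Str.lower part
    if part_lower = "nonbr" ∨ part_lower = "nonbrand" then some "NonBrand"
    else if part_lower = "br" ∨ part_lower = "brand" then some "Brand"
    else pvFindBrand parts

def pvOr (x y : Option String) : Option String :=
  match x with
  | some v => some v
  | none => y

theorem pvLoopEngine_eq (parts : List String) (result : PySem.Dict String (Option String)) :
    pvLoopEngine parts result =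
      match pvFindEngine parts with
      | none => result
      | some v => result.insert "engine" (some v) := by
  induction parts generalizing result with
  | nil => simp [pvLoopEngine, pvFindEngine]
  | cons p ps ih =>
    simp only [pvLoopEngine, pvFindEngine]
    split_ifs <;> simp [ih]

theorem pvLoopCustomer_eq (parts : List String) (result : PySem.Dict String (Option String)) :
    pvLoopCustomer parts result =
      match pvFindCustomer parts with
      | none => result
      | some v => result.insert "Customer_type" (some v) := by
  induction parts generalizing result with
  | nil => simp [pvLoopCustomer, pvFindCustomer]
  | cons p ps ih =>
    simp only [pvLoopCustomer, pvFindCustomer]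
    split_ifs <;> simp [ih]

theorem pvLoopBrand_eq (parts : List String) (result : PySem.Dict String (Option String)) :
    pvLoopBrand parts result =
      match pvFindBrand parts with
      | none => result
      | some v => result.insert "brand" (some v) := by
  induction parts generalizing result with
  | nil => simp [pvLoopBrand, pvFindBrand]
  | cons p ps ih =>
    simp only [pvLoopBrand, pvFindBrand]
    split_ifs <;> simp [ih]

def pvPartE (part : String) : Option String :=
  let pc := PySem.Str.lower (PySem.Str.strip part)
  if PySem.Str.isIn "google" pc then some "Google"
  else if PySem.Str.isIn "bing" pc then some "Bing"
  else none

def pvPartC (part : String) : Option String :=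
  let pu := PySem.Str.upper part
  if pu = "CC" ∨ pu = "NC" then some pu else none

def pvPartB (part : String) : Option String :=
  let pl := PySem.Str.lower part
  if pl = "nonbr" ∨ pl = "nonbrand" then some "NonBrand"
  else if pl = "br" ∨ pl = "brand" then some "Brand"
  else none

theorem pvOr_assoc (x y z : Option String) : pvOr (pvOr x y) z = pvOr x (pvOr y z) := by
  cases x <;> rfl

theorem pvOr_of_isSome (x y : Option String) (h : x.isSome = true) : pvOr x y = x := by
  cases x <;> simp_all [pvOr]

theorem pvFindEngine_cons (p : String) (ps : List String) :
    pvFindEngine (p :: ps) = pvOr (pvPartE p) (pvFindEngine ps) := by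
  simp only [pvFindEngine, pvPartE]; split_ifs <;> rfl

theorem pvFindCustomer_cons (p : String) (ps : List String) :
    pvFindCustomer (p :: ps) = pvOr (pvPartC p) (pvFindCustomer ps) := by
  simp only [pvFindCustomer, pvPartC]; split_ifs <;> rfl

theorem pvFindBrand_cons (p : String) (ps : List String) :
    pvFindBrand (p :: ps) = pvOr (pvPartB p) (pvFindBrand ps) := by
  simp only [pvFindBrand, pvPartB]; split_ifs <;> rfl

theorem pvIte_isNone (x y : Option String) : (if x.isNone then y else x) = pvOr x y := by
  cases x <;> rfl

theorem pvOr_none (x : Option String) : pvOr x none = x := by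
  cases x <;> rfl

theorem pvScan_cons (p : String) (ps : List String) (c e b : Option String) :
    pvScan (p :: ps) c e b =
      (if (pvOr e (pvPartE p)).isSome && (pvOr c (pvPartC p)).isSome && (pvOr b (pvPartB p)).isSome
       then (pvOr c (pvPartC p), pvOr e (pvPartE p), pvOr b (pvPartB p))
       else pvScan ps (pvOr c (pvPartC p)) (pvOr e (pvPartE p)) (pvOr b (pvPartB p))) := by
  conv_lhs => rw [pvScan]
  simp only [pvIte_isNone, pvPartE, pvPartC, pvPartB]

theorem pvScan_eq (parts : List String) (c e b : Option String) :
    pvScan parts c e b =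
      (pvOr c (pvFindCustomer parts), pvOr e (pvFindEngine parts), pvOr b (pvFindBrand parts)) := by
  induction parts generalizing c e b with
  | nil => simp [pvScan, pvFindCustomer, pvFindEngine, pvFindBrand, pvOr_none]
  | cons p ps ih =>
    rw [pvScan_cons, pvFindEngine_cons, pvFindCustomer_cons, pvFindBrand_cons,
      ← pvOr_assoc, ← pvOr_assoc, ← pvOr_assoc]
    split_ifs with h
    · simp only [Bool.and_eq_true] at h
      obtain ⟨⟨he, hc⟩, hb⟩ := h
      rw [pvOr_of_isSome _ _ hc, pvOr_of_isSome _ _ he, pvOr_of_isSome _ _ hb]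
    · exact ih _ _ _

-- A's final dict items, by cases on the three first-match values
theorem pvA_eq (parts : List String) :
    (pvLoopBrand parts (pvLoopCustomer parts (pvLoopEngine parts
        ⟨[("Customer_type", none), ("engine", none), ("brand", none)]⟩))).items =
      [("Customer_type", pvFindCustomer parts), ("engine", pvFindEngine parts),
       ("brand", pvFindBrand parts)] := by
  rw [pvLoopEngine_eq, pvLoopCustomer_eq, pvLoopBrand_eq]
  cases pvFindEngine parts <;> cases pvFindCustomer parts <;> cases pvFindBrand parts <;>
    simp [PySem.Dict.insert]

-- ===== VERDICT (by name: the statement is the Claim_ definition above) =====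
theorem monthly_parse_campaign_name_spec : Claim_equal_monthly_parse_campaign_name := by
  intro campaign_name _
  unfold Spec_monthly_parse_campaign_name monthly_parse_campaign_name monthly_parse_campaign_name_alt
  rw [pvA_eq]
  simp only [pvScan_eq]
  cases pvFindCustomer ((PySem.Str.split? campaign_name "_").getD []) <;>
    cases pvFindEngine ((PySem.Str.split? campaign_name "_").getD []) <;>
    cases pvFindBrand ((PySem.Str.split? campaign_name "_").getD []) <;>
    simp [pvOr]
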